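-- pv_equiv track=rewrite | github.com/amanraj5429/algorithms | substring_of_size_three_with_distinct_char.py | sub_size_three
-- ===== SOURCE A (Python) =====
-- def sub_size_three(s):
--     subs = []
--     n = len(s)
--     for i in range(n):
--         for j in range(i+1, n+1):
--             sub = s[i:j]
--             subs.append(sub)
--
--     len_three_sub = [i for i in subs if len(i) == 3 and len(set(i)) == 3]
--     return len(len_three_sub)
-- ===== SOURCE B (Python) =====
-- def sub_size_three(s):
--     count = 0
--     for k in range(len(s) - 2):
--         if s[k] != s[k+1] and s[k] != s[k+2] and s[k+1] != s[k+2]: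
--             count += 1
--     return count
-- ===== Notes on version B (the rewrite author's own statement) =====
-- stated objective: faster
-- what changed: Instead of materializing all O(n^2) substrings and filtering the length-3 ones, B slides a window of size 3 once over the string and counts windows whose three characters are pairwise distinct.
import Mathlib
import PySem

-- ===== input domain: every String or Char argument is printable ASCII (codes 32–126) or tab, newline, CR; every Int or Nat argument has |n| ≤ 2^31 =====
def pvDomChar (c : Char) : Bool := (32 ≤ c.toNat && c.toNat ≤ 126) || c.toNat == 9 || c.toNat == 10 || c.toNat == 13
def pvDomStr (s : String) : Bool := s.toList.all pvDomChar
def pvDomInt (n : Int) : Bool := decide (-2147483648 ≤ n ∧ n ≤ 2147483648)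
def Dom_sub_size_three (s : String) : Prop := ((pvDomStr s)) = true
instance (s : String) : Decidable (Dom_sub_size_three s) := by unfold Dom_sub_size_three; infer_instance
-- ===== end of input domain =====

-- B replaces A's O(n^2) list of all substrings with a single sliding-window pass (faster).

-- ===== PORT A =====
-- Literal port of A: collect every substring s[i:j], then count those of length 3 with 3 distinct chars.
def sub_size_three (s : String) : Int :=
  let cs := s.toList
  let n : Int := cs.length
  let subs : List (List Char) :=
    (PySem.List.pyRange 0 n 1).foldl (fun acc i =>
      (PySem.List.pyRange (i + 1) (n + 1) 1).foldl (fun acc2 j =>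
        acc2 ++ [PySem.List.slice cs (some i) (some j)]) acc) []
  let lenThree : List (List Char) :=
    subs.filter (fun t => t.length == 3 && (PySem.Set.ofList t).length == 3)
  (lenThree.length : Int)

-- ===== PORT B =====
-- Literal port of B: one pass over the windows of size 3, counting the pairwise-distinct ones.
def sub_size_three_alt (s : String) : Int :=
  let cs := s.toList
  let n : Int := cs.length
  (PySem.List.pyRange 0 (n - 2) 1).foldl (fun count k =>
    if PySem.List.pyGetD cs k ' ' ≠ PySem.List.pyGetD cs (k + 1) ' ' ∧
       PySem.List.pyGetD cs k ' ' ≠ PySem.List.pyGetD cs (k + 2) ' ' ∧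
       PySem.List.pyGetD cs (k + 1) ' ' ≠ PySem.List.pyGetD cs (k + 2) ' '
    then count + 1 else count) 0

-- ===== PRECONDITION & SPEC =====
def Spec_sub_size_three (s : String) (out : Int) : Prop := out = sub_size_three_alt s
instance (s : String) (out : Int) : Decidable (Spec_sub_size_three s out) := by unfold Spec_sub_size_three; infer_instance

-- ===== CLAIM (what is proved, stated in full; the proofs are below) =====
def Claim_equal_sub_size_three : Prop := ∀ (s : String), Dom_sub_size_three s → Spec_sub_size_three s (sub_size_three s)

-- ===== LEMMAS AND PROOFS =====

-- shared normal form of both sides: the window at position k has three pairwise-distinct chars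
def pvDist3 (cs : List Char) (k : Nat) : Bool :=
  decide (cs.getD k ' ' ≠ cs.getD (k + 1) ' ' ∧
          cs.getD k ' ' ≠ cs.getD (k + 2) ' ' ∧
          cs.getD (k + 1) ' ' ≠ cs.getD (k + 2) ' ')

-- a Python set of three elements has size 3 iff the elements are pairwise distinct
theorem pv_set3 (a b c : Char) :
    ((PySem.Set.ofList [a, b, c]).length == 3) = decide (a ≠ b ∧ a ≠ c ∧ b ≠ c) := by
  simp [PySem.Set.ofList, PySem.Set.add, PySem.Set.contains, List.foldl]
  by_cases h1 : a = b <;> by_cases h2 : a = c <;> by_cases h3 : b = c <;>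
    simp [h1, h2, h3] <;> split_ifs <;> simp_all [eq_comm]

theorem pv_take3 (cs : List Char) (k : Nat) (h : k + 2 < cs.length) :
    (cs.drop k).take 3 = [cs.getD k ' ', cs.getD (k+1) ' ', cs.getD (k+2) ' '] := by
  rw [List.getD_eq_getElem _ _ (by omega : k < cs.length),
      List.getD_eq_getElem _ _ (by omega : k + 1 < cs.length),
      List.getD_eq_getElem _ _ (by omega : k + 2 < cs.length),
      List.drop_eq_getElem_cons (by omega), List.drop_eq_getElem_cons (by omega),
      List.drop_eq_getElem_cons (by omega)]
  rfl

-- A's inner loop at start index k contributes 1 exactly when the window at k fits and is distinct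
theorem pv_inner (cs : List Char) (k : Nat) (hk : k < cs.length) :
    (List.filter (fun t => t.length == 3 && List.length (PySem.Set.ofList t) == 3)
        (List.map (fun x => PySem.List.slice cs (some (k : Int)) (some x))
          (PySem.List.pyRange ((k : Int) + 1) ((cs.length : Int) + 1)))).length
      = if k + 2 < cs.length ∧ pvDist3 cs k then 1 else 0 := by
  rw [← List.countP_eq_length_filter, List.countP_map, PySem.List.pyRange_one, List.countP_map]
  have hlen : (((cs.length : Int) + 1) - ((k : Int) + 1)).toNat = cs.length - k := by omega
  rw [hlen]
  trans (List.countP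
      (fun t => decide (t = 2) && ((PySem.Set.ofList ((cs.drop k).take 3)).length == 3))
      (List.range (cs.length - k)))
  · apply List.countP_congr
    intro t ht
    simp only [Function.comp]
    have e : ((k : Int) + 1 + (t : Int)) = ((k : Int) + ((t + 1 : Nat) : Int)) := by push_cast; ring
    rw [e, PySem.List.slice_natCast_add]
    have hlt : t < cs.length - k := List.mem_range.mp ht
    have htake : ((cs.drop k).take (t+1)).length = t + 1 := by
      simp [List.length_take, List.length_drop]; omega
    by_cases h2 : t = 2
    · subst h2; simp [htake]
    · simp [htake, h2]
  · by_cases hq : ((PySem.Set.ofList ((cs.drop k).take 3)).length == 3) = true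
    · simp only [hq, Bool.and_true]
      have hcnt : List.countP (fun t => decide (t = 2)) (List.range (cs.length - k)) =
          List.count 2 (List.range (cs.length - k)) := by
        apply (List.countP_congr _).symm; intro x _; simp
      rw [hcnt, List.count_range]
      by_cases hc : k + 2 < cs.length
      · have hpv : pvDist3 cs k = true := by
          have h3 := pv_set3 (cs.getD k ' ') (cs.getD (k+1) ' ') (cs.getD (k+2) ' ')
          rw [pv_take3 cs k hc, h3] at hq
          simpa [pvDist3] using hq
        have h2 : 2 < cs.length - k := by omega
        simp [h2, hc, hpv]
      · have h2 : ¬ (2 < cs.length - k) := by omega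
        simp [h2, hc]
    · simp only [Bool.not_eq_true] at hq
      have hfalse : ∀ t : Nat, (decide (t = 2) &&
          ((PySem.Set.ofList ((cs.drop k).take 3)).length == 3)) = false := by
        intro t; simp [hq]
      rw [List.countP_eq_zero.mpr (by intro t _; simp [hfalse t])]
      rw [if_neg]
      rintro ⟨hc, hd⟩
      have : (List.length (PySem.Set.ofList (List.take 3 (List.drop k cs))) == 3) = true := by
        rw [pv_take3 cs k hc, pv_set3]
        simpa [pvDist3] using hd
      rw [hq] at this; exact Bool.false_ne_true this

-- the window condition k+2 < m restricts the count over range m to range (m-2)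
theorem pv_trunc (d : Nat → Bool) (m : Nat) :
    List.countP (fun k => decide (k + 2 < m) && d k) (List.range m)
      = List.countP d (List.range (m - 2)) := by
  by_cases hm : 2 ≤ m
  · obtain ⟨a, rfl⟩ : ∃ a, m = a + 2 := ⟨m - 2, by omega⟩
    rw [List.range_add, List.countP_append]
    have h1 : List.countP (fun k => decide (k + 2 < a + 2) && d k) (List.range a)
        = List.countP d (List.range a) := by
      apply List.countP_congr; intro k hk
      have : k < a := List.mem_range.mp hk
      simp [this]
    have h2 : List.countP (fun k => decide (k + 2 < a + 2) && d k)
        (List.map (fun x => a + x) (List.range 2)) = 0 := by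
      rw [List.countP_eq_zero]
      intro t ht
      obtain ⟨x, hx, rfl⟩ := List.mem_map.mp ht
      simp
    rw [h1, h2]
    simp
  · have h0 : m - 2 = 0 := by omega
    rw [h0]
    simp only [List.range_zero, List.countP_nil]
    rw [List.countP_eq_zero]
    intro t ht
    have : t < m := List.mem_range.mp ht
    simp; omega

theorem pv_a_eq (s : String) :
    sub_size_three s = ((List.range (s.toList.length - 2)).countP (pvDist3 s.toList) : Int) := by
  unfold sub_size_three
  simp only [PySem.List.foldl_append_singleton_eq_map, PySem.List.foldl_append_eq_flatMap,
    List.nil_append]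
  rw [show ((s.toList.length : Int)) = ((s.toList.length : Nat) : Int) from rfl]
  rw [PySem.List.pyRange_zero_nat]
  rw [List.filter_flatMap, List.length_flatMap, List.map_map]
  rw [List.map_congr_left (g := fun k : Nat =>
      (if (decide (k + 2 < s.toList.length) && pvDist3 s.toList k) = true then 1 else 0 : Nat))
    (by
      intro k hk
      simp only [Function.comp]
      rw [pv_inner s.toList k (List.mem_range.mp hk)]
      by_cases h1 : k + 2 < s.toList.length <;> by_cases h2 : pvDist3 s.toList k <;>
        simp [h2])]
  rw [PySem.List.sum_map_ite_one_zero_nat]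
  rw [pv_trunc]

theorem pv_alt_eq (s : String) :
    sub_size_three_alt s = ((List.range (s.toList.length - 2)).countP (pvDist3 s.toList) : Int) := by
  unfold sub_size_three_alt
  simp only []
  rw [PySem.List.foldl_ite_add_one]
  rw [PySem.List.pyRange_one]
  rw [List.countP_map]
  have h : ((s.toList.length : Int) - 2 - 0).toNat = s.toList.length - 2 := by omega
  rw [h]
  rw [zero_add]
  congr 1
  apply List.countP_congr
  intro k _
  simp only [Function.comp, pvDist3, zero_add]
  have e1 : ((k : Int) + 1) = ((k + 1 : Nat) : Int) := by push_cast; ring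
  have e2 : ((k : Int) + 2) = ((k + 2 : Nat) : Int) := by push_cast; ring
  rw [e1, e2]
  simp only [PySem.List.pyGetD_natCast]

-- ===== VERDICT (by name: the statement is the Claim_ definition above) =====
theorem sub_size_three_spec : Claim_equal_sub_size_three := by
  intro s _
  unfold Spec_sub_size_three
  rw [pv_a_eq, pv_alt_eq]
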